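-- pv_equiv track=rewrite | github.com/nbrockington/cipher-challenge | vigenere.py | interleave_substrings
-- ===== SOURCE A (Python) =====
-- def interleave_substrings( list_of_substrings ):
--
--    n_strings = len( list_of_substrings )
--
--    len_strings = [ len( s ) for s in list_of_substrings ]
--
--    text_list = []
--
--    for i in range( max( len_strings ) ):
--
--       for j in range( n_strings ):
--
--          if i < len_strings[ j ]:
--
--             text_list.append( list_of_substrings[ j ][ i ] )
--
--    return ''.join( text_list )
-- ===== SOURCE B (Python) =====
-- def interleave_substrings(list_of_substrings):
--     pieces = []
--     remaining = list(list_of_substrings)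
--     while any(remaining):
--         pieces.append(''.join(s[:1] for s in remaining))
--         remaining = [s[1:] for s in remaining]
--     return ''.join(pieces)
-- ===== Notes on version B (the rewrite author's own statement) =====
-- stated objective: idiomatic
-- what changed: B transposes column by column (peel the first character of every remaining string, then drop it) instead of A's nested index loops with per-index bound checks; same O(total chars) cost.
import Mathlib
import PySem

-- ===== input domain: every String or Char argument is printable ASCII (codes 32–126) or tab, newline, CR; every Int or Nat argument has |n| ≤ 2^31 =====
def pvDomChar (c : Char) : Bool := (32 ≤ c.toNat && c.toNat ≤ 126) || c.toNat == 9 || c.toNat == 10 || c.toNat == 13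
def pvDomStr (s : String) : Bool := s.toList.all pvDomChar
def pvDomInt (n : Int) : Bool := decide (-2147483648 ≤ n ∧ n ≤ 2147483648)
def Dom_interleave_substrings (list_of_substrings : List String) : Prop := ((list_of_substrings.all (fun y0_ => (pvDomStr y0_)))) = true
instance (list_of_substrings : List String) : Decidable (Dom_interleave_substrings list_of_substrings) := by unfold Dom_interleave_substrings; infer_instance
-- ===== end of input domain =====

-- B transposes the strings column by column (peel first chars, then drop them) instead of
-- A's nested index loops; equivalent wherever A returns; B returns "" where A raises.

-- ===== PORT A =====
-- Python: max(len_strings) raises ValueError on []; the [] branch here is unreachable under Pre_.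
def interleave_substrings (list_of_substrings : List String) : String :=
  let n_strings := list_of_substrings.length
  let len_strings := list_of_substrings.map (fun s => s.toList.length)
  match len_strings with
  | [] => ""   -- Python raises ValueError here; excluded by Pre_
  | h :: t =>
    let m := t.foldl Nat.max h   -- max(len_strings) over the nonempty list
    let text_list :=
      (List.range m).foldl (fun acc i =>
        (List.range n_strings).foldl (fun acc j =>
          if i < len_strings.getD j 0 then
            acc ++ [((list_of_substrings.getD j "").toList).getD i ' ']
          else acc) acc) ([] : List Char)
    String.mk text_list

-- ===== PORT B =====
-- termination measure for Source B's while-loop: total remaining characters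
theorem sum_tail_le (as : List (List Char)) :
    ((as.map List.tail).map List.length).sum ≤ (as.map List.length).sum := by
  induction as with
  | nil => simp
  | cons a as ih =>
    simp only [List.map_cons, List.sum_cons]
    have : a.tail.length ≤ a.length := by cases a <;> simp
    omega

theorem sum_tail_lt (rem : List (List Char))
    (h : rem.any (fun s => !s.isEmpty) = true) :
    ((rem.map List.tail).map List.length).sum < (rem.map List.length).sum := by
  induction rem with
  | nil => simp at h
  | cons a as ih =>
    simp only [List.map_cons, List.sum_cons]
    by_cases ha : a = []
    · subst ha
      have h' : as.any (fun s => !s.isEmpty) = true := by simpa using h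
      have := ih h'
      simpa using this
    · have h1 : a.tail.length < a.length := by
        cases a with
        | nil => exact absurd rfl ha
        | cons _ _ => simp
      have := sum_tail_le as
      omega

-- loop of Source B: while any(remaining): take first char of each string, then drop it
def altLoop (rem : List (List Char)) : List Char :=
  if h : rem.any (fun s => !s.isEmpty) = true then
    rem.filterMap List.head? ++ altLoop (rem.map List.tail)
  else []
termination_by (rem.map List.length).sum
decreasing_by simpa using sum_tail_lt rem h

def interleave_substrings_alt (list_of_substrings : List String) : String :=
  String.mk (altLoop (list_of_substrings.map String.toList))

-- ===== PRECONDITION & SPEC =====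
-- Pre_ excludes exactly the empty list, on which A raises ValueError (max of empty sequence).
def Pre_interleave_substrings (list_of_substrings : List String) : Prop :=
  list_of_substrings ≠ []
instance (list_of_substrings : List String) : Decidable (Pre_interleave_substrings list_of_substrings) := by unfold Pre_interleave_substrings; infer_instance
def pvWitness_interleave_substrings : List String := ["abc", "de"]

def Spec_interleave_substrings (list_of_substrings : List String) (out : String) : Prop := out = interleave_substrings_alt list_of_substrings
instance (list_of_substrings : List String) (out : String) : Decidable (Spec_interleave_substrings list_of_substrings out) := by unfold Spec_interleave_substrings; infer_instance

-- ===== CLAIM (what is proved, stated in full; the proofs are below) =====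
def Claim_equal_interleave_substrings : Prop := ∀ (list_of_substrings : List String), Dom_interleave_substrings list_of_substrings → Pre_interleave_substrings list_of_substrings → Spec_interleave_substrings list_of_substrings (interleave_substrings list_of_substrings)

-- ===== LEMMAS AND PROOFS =====

-- column i of a list of char-lists: the chars at index i of each row, in order
def colAt (i : Nat) (rem : List (List Char)) : List Char :=
  rem.filterMap (fun s => s[i]?)

theorem colAt_zero (rem : List (List Char)) : colAt 0 rem = rem.filterMap List.head? := by
  unfold colAt
  congr 1
  funext s
  cases s <;> simp

theorem colAt_tail (i : Nat) (rem : List (List Char)) :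
    colAt i (rem.map List.tail) = colAt (i + 1) rem := by
  induction rem with
  | nil => rfl
  | cons a as ih =>
    simp only [colAt, List.map_cons, List.filterMap_cons] at *
    cases a <;> simp_all

def maxLen (rem : List (List Char)) : Nat :=
  rem.foldl (fun a s => Nat.max a s.length) 0

theorem foldl_max_bounds (t : List (List Char)) :
    ∀ a : Nat, (∀ s ∈ t, s.length ≤ t.foldl (fun a s => Nat.max a s.length) a) ∧
      a ≤ t.foldl (fun a s => Nat.max a s.length) a := by
  induction t with
  | nil => intro a; exact ⟨by simp, Nat.le_refl a⟩
  | cons b bs ih =>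
    intro a
    obtain ⟨h1, h2⟩ := ih (Nat.max a b.length)
    refine ⟨?_, le_trans (Nat.le_max_left _ _) h2⟩
    intro s hs
    rcases List.mem_cons.mp hs with rfl | hs
    · exact le_trans (Nat.le_max_right _ _) h2
    · exact h1 s hs

theorem le_maxLen {rem : List (List Char)} {s : List Char} (hs : s ∈ rem) :
    s.length ≤ maxLen rem :=
  (foldl_max_bounds rem 0).1 s hs

theorem maxLen_le {rem : List (List Char)} {n : Nat}
    (h : ∀ s ∈ rem, s.length ≤ n) : maxLen rem ≤ n := by
  unfold maxLen
  suffices H : ∀ a, a ≤ n → rem.foldl (fun a s => Nat.max a s.length) a ≤ n from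
    H 0 (Nat.zero_le n)
  induction rem with
  | nil => intro a ha; simpa using ha
  | cons b bs ih =>
    intro a ha
    simp only [List.foldl_cons]
    exact ih (fun s hs => h s (List.mem_cons_of_mem _ hs)) _
      (Nat.max_le.mpr ⟨ha, h b (List.mem_cons_self)⟩)

theorem maxLen_eq_zero {rem : List (List Char)} (h : maxLen rem = 0) :
    ∀ s ∈ rem, s = [] := by
  intro s hs
  have hle := le_maxLen hs
  rw [h] at hle
  cases s with
  | nil => rfl
  | cons _ _ => simp at hle

theorem maxLen_tail (rem : List (List Char)) (h : maxLen rem ≠ 0) :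
    maxLen (rem.map List.tail) = maxLen rem - 1 := by
  apply Nat.le_antisymm
  · apply maxLen_le
    intro s hs
    obtain ⟨t, ht, rfl⟩ := List.mem_map.mp hs
    have := le_maxLen ht
    cases t <;> simp_all <;> omega
  · by_contra hc
    push_neg at hc
    have hb : ∀ s ∈ rem, s.length ≤ maxLen rem - 1 := by
      intro s hs
      have h1 : s.tail ∈ rem.map List.tail := List.mem_map_of_mem hs
      have h2 := le_maxLen h1
      have h3 : s.tail.length < maxLen rem - 1 := lt_of_le_of_lt h2 hc
      cases s <;> simp_all <;> omega
    have := maxLen_le hb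
    omega

theorem altLoop_eq (n : Nat) (rem : List (List Char)) (h : maxLen rem = n) :
    altLoop rem = (List.range n).flatMap (fun i => colAt i rem) := by
  induction n generalizing rem with
  | zero =>
    rw [altLoop]
    have hall := maxLen_eq_zero h
    have hfalse : rem.any (fun s => !s.isEmpty) = false := by
      rw [List.any_eq_false]
      intro s hs
      rw [hall s hs]
      simp
    simp [hfalse]
  | succ k ih =>
    rw [altLoop]
    have hne : rem.any (fun s => !s.isEmpty) = true := by
      by_contra hcon
      rw [Bool.not_eq_true, List.any_eq_false] at hcon
      have hall : ∀ s ∈ rem, s.length ≤ 0 := by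
        intro s hs
        have := hcon s hs
        cases s with
        | nil => simp
        | cons _ _ => simp at this
      have := maxLen_le hall
      omega
    rw [dif_pos hne]
    have htail : maxLen (rem.map List.tail) = k := by
      rw [maxLen_tail rem (by omega), h]
      omega
    rw [ih _ htail]
    rw [List.range_succ_eq_map]
    simp only [List.flatMap_cons, colAt_zero]
    congr 1
    rw [List.flatMap_map]
    congr 1
    funext i
    exact colAt_tail i rem

-- A's inner loop over j appends exactly column i
theorem innerA_eq (lst : List String) (i : Nat) (acc : List Char) :
    (List.range lst.length).foldl (fun acc j =>
      if i < (lst.map (fun s => s.toList.length)).getD j 0 then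
        acc ++ [((lst.getD j "").toList).getD i ' ']
      else acc) acc
    = acc ++ colAt i (lst.map String.toList) := by
  induction lst using List.reverseRecOn generalizing acc with
  | nil => simp [colAt]
  | append_singleton xs x ih =>
    rw [List.length_append, List.length_cons, List.length_nil, List.range_succ,
        List.foldl_append]
    have hcong : (List.range xs.length).foldl (fun acc j =>
        if i < ((xs ++ [x]).map (fun s => s.toList.length)).getD j 0 then
          acc ++ [(((xs ++ [x]).getD j "").toList).getD i ' ']
        else acc) acc
      = (List.range xs.length).foldl (fun acc j =>
        if i < (xs.map (fun s => s.toList.length)).getD j 0 then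
          acc ++ [((xs.getD j "").toList).getD i ' ']
        else acc) acc := by
      apply PySem.List.foldl_congr_mem
      intro a j hj
      have hjlt : j < xs.length := List.mem_range.mp hj
      have h1 : ((xs ++ [x]).map (fun s => s.toList.length)).getD j 0
          = (xs.map (fun s => s.toList.length)).getD j 0 := by
        rw [List.map_append]
        rw [List.getD_append _ _ _ _ (by simpa using hjlt)]
      have h2 : (xs ++ [x]).getD j "" = xs.getD j "" := by
        rw [List.getD_append _ _ _ _ hjlt]
      rw [h1, h2]
    rw [hcong, ih]
    simp only [List.foldl_cons, List.foldl_nil]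
    have hxlen : ((xs ++ [x]).map (fun s => s.toList.length)).getD xs.length 0
        = x.toList.length := by
      rw [List.map_append]
      rw [List.getD_append_right _ _ _ _ (by simpa using Nat.le_refl _)]
      simp
    have hxget : (xs ++ [x]).getD xs.length "" = x := by
      rw [List.getD_append_right _ _ _ _ (Nat.le_refl _)]
      simp
    rw [hxlen, hxget]
    have hcol : colAt i ((xs ++ [x]).map String.toList)
        = colAt i (xs.map String.toList) ++ colAt i [x.toList] := by
      unfold colAt
      rw [List.map_append, List.filterMap_append]
      rfl
    rw [hcol]
    by_cases hix : i < x.toList.length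
    · rw [if_pos hix]
      have hone : colAt i [x.toList] = [x.toList.getD i ' '] := by
        unfold colAt
        simp [List.getElem?_eq_getElem hix, List.getD_eq_getElem?_getD]
      rw [hone, List.append_assoc]
    · rw [if_neg hix]
      have hnone : colAt i [x.toList] = [] := by
        unfold colAt
        simp [List.getElem?_eq_none_iff.mpr (Nat.le_of_not_lt hix)]
      rw [hnone, List.append_nil]

-- A's outer loop builds the concatenation of columns 0..m-1
theorem outerA_eq (lst : List String) (m : Nat) :
    (List.range m).foldl (fun acc i =>
      (List.range lst.length).foldl (fun acc j =>
        if i < (lst.map (fun s => s.toList.length)).getD j 0 then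
          acc ++ [((lst.getD j "").toList).getD i ' ']
        else acc) acc) ([] : List Char)
    = (List.range m).flatMap (fun i => colAt i (lst.map String.toList)) := by
  suffices H : ∀ acc, (List.range m).foldl (fun acc i =>
      (List.range lst.length).foldl (fun acc j =>
        if i < (lst.map (fun s => s.toList.length)).getD j 0 then
          acc ++ [((lst.getD j "").toList).getD i ' ']
        else acc) acc) acc
      = acc ++ (List.range m).flatMap (fun i => colAt i (lst.map String.toList)) by
    simpa using H []
  induction m with
  | zero => intro acc; simp
  | succ k ih =>
    intro acc
    rw [List.range_succ, List.foldl_append, List.flatMap_append, ih]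
    simp only [List.foldl_cons, List.foldl_nil, List.flatMap_cons, List.flatMap_nil,
      List.append_nil]
    rw [innerA_eq, List.append_assoc]

theorem maxLen_map (lst : List String) :
    maxLen (lst.map String.toList) = (lst.map (fun s => s.toList.length)).foldl Nat.max 0 := by
  unfold maxLen
  rw [List.foldl_map, List.foldl_map]

-- ===== VERDICT (by name: the statement is the Claim_ definition above) =====
theorem interleave_substrings_spec : Claim_equal_interleave_substrings := by
  intro lst _ hpre
  unfold Spec_interleave_substrings interleave_substrings interleave_substrings_alt
  cases lst with
  | nil => exact absurd rfl hpre
  | cons s rest =>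
    simp only [List.map_cons]
    have hfold : (s.toList.length :: List.map (fun s => s.toList.length) rest)
        = List.map (fun s => s.toList.length) (s :: rest) := rfl
    simp only [hfold]
    rw [outerA_eq (s :: rest)]
    have hm : maxLen ((s :: rest).map String.toList)
        = List.foldl Nat.max s.toList.length (List.map (fun s => s.toList.length) rest) := by
      rw [maxLen_map]
      simp [List.map_cons]
    rw [← hm, ← altLoop_eq _ _ rfl]
    rfl
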